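-- pv_equiv track=rewrite | github.com/LazareLive/AutomatedDices | Dice_Script.py | sequenceNumberBipyramidalDice
-- ===== SOURCE A (Python) =====
-- import math, os
--
-- def isEven(n):
--     return ((n % 2) == 0)
--
-- def recursiveDiceNumberSequence(order):
--     #There are several "notable" sequences that we will use for the dice number sequence. They are called triad,
--     #tetrad and pentad. As order cannot be less than 3, we will only use these sequences to generate any dice.
--     #The goal will be to divide the number of faces until we can find a sequence. These sequences are generated by
--     #using various calculations on the classic dices.
--     #Tetrad case - Taken on the D3 and D6 dequences
--     if(order == 3):
--         return [3, 1, 2]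
--     #Tetrad case - Taken on the D8 sequence
--     elif(order == 4):
--         return [4, 1, 3, 2]
--     #Pentad case - Taken on the D10 sequence -- to be checked. This does not feel right
--     elif(order == 5):
--         return [5, 1, 4, 2, 3]
--     #For any other cases : use recursion until we find a n-ad sequence
--     newOrder = math.trunc(order / 2)
--     recursiveSequence = recursiveDiceNumberSequence(newOrder)
--     #As the recursiveSequence will send half of the information, creation of a new array
--     numberSequence = [0] * order
--     if(isEven(order)):
--         #On the case of an even order dice, check witch method to use based on the last recursion sequence
--         for i in range(newOrder):
--                 #Generate the even-numbers on one polar side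
--                 numberSequence[i] = recursiveSequence[i] * 2
--                 #Generate the odd_numbers on the other side
--                 if(isEven(newOrder)):
--                     #On the even-even case, the last sequence is repeated to generate the current order
--                     numberSequence[newOrder + i] = numberSequence[i] - 1
--                 else:
--                     #On the even-odd case, the last sequence must be inverted to have a weak-strong alternance
--                     numberSequence[newOrder + i] = ((newOrder - recursiveSequence[i] + 1) * 2) - 1
--     else:
--         #On the case of an odd dice order, generate the dice following these rules
--         #Placement of the first number
--         numberSequence[0] = order
--         #Placement of the recursive sequence
--         for i in range(newOrder):
--             #Generation of the even numbers on a polar side of the order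
--             numberSequence[i + 1] = recursiveSequence[newOrder - i - 1] * 2
--             #Generation of the odd numbers
--             numberSequence[order - (i + 1)] = order - numberSequence[i + 1]
--     #Return the number sequence at the end
--     return numberSequence
--
-- def diceNumberAlgorithmSequence(faces):
--     #First: check the number of asked faces. Cannot be less than 3.
--     if(faces < 3):
--         return [(i + 1) for i in range(faces)]
--     #If the number of faces is 4, a specific array must be returned as this cannot be created by the algorithm, and this is
--     #the only solution for a 4 sided die
--     if(faces == 4):
--         return [4, 2, 1, 3]
--     #In all other cases, we need to check whereas the die is even or odd
--     if(isEven(faces)):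
--         #If it is even, the generation will follow the standard dice number sequence generation as the opposite sides must be
--         #equal to the number of the die faces plus one.
--         #Calculation of the even number sequence
--         evenFaces = math.trunc(faces / 2)
--         numberSequenceOrder = recursiveDiceNumberSequence(evenFaces)
--         for i in range(evenFaces):
--             #For each even number generated (NSO multiplied by 2)
--             numberSequenceOrder[i] = numberSequenceOrder[i] * 2
--             #Creation of the opposite side of the die
--             numberSequenceOrder.append(faces - numberSequenceOrder[i] + 1)
--         return numberSequenceOrder
--     else:
--         #If it is odd, the generation is automatically created by the recursion
--         return recursiveDiceNumberSequence(faces)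
--     #In case of a problem, always send zero
--     return [0]
--
-- def sequenceNumberBipyramidalDice(faces):
--     #Get the sequence based on the number of faces
--     sequenceOrder = diceNumberAlgorithmSequence(faces)
--     #If the number of faces is 10, replace 10 with 0
--     if (faces == 10):
--         tenPosition = sequenceOrder.index(10)
--         sequenceOrder[tenPosition] = 0
--     #Generate the bipyramidal sequence
--     bipyramidalSequence = [0] * faces
--     #Calcul the base polygon sides
--     polygonSides = math.trunc(faces/2)
--     for i in range(0, polygonSides):
--         #First half of the sequence stays
--         bipyramidalSequence[i] = sequenceOrder[i]
--         #Of the odd numbers, need to invert the sequence except for the first one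
--         position = ((i * (-1)) % polygonSides) + polygonSides
--         bipyramidalSequence[position] = sequenceOrder[i + polygonSides]
--     return bipyramidalSequence
-- ===== SOURCE B (Python) =====
-- def sequenceNumberBipyramidalDice(faces):
--     #Bottom-up iterative construction (no recursion): build the halving chain of
--     #orders, rebuild the number sequence from the base case upward, then scatter
--     #it onto the bipyramidal layout.
--     if faces < 3:
--         seq = list(range(1, faces + 1))
--     elif faces == 4:
--         seq = [4, 2, 1, 3]
--     else:
--         order = faces // 2 if faces % 2 == 0 else faces
--         chain = []
--         while order not in (3, 4, 5):
--             chain.append(order)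
--             order //= 2
--         if order == 3:
--             seq = [3, 1, 2]
--         elif order == 4:
--             seq = [4, 1, 3, 2]
--         else:
--             seq = [5, 1, 4, 2, 3]
--         #Rebuild upward, smallest order first
--         for n in reversed(chain):
--             h = n // 2
--             if n % 2 == 0:
--                 if h % 2 == 0:
--                     seq = [x * 2 for x in seq] + [x * 2 - 1 for x in seq]
--                 else:
--                     seq = [x * 2 for x in seq] + [(h - x + 1) * 2 - 1 for x in seq]
--             else:
--                 evens = [seq[h - 1 - i] * 2 for i in range(h)]
--                 seq = [n] + evens + [n - e for e in reversed(evens)]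
--         if faces % 2 == 0:
--             doubled = [x * 2 for x in seq]
--             seq = doubled + [faces - x + 1 for x in doubled]
--     #A ten-sided die is numbered 0-9
--     if faces == 10:
--         seq[seq.index(10)] = 0
--     #Scatter onto the bipyramid: lower cap kept in order, upper cap mirrored
--     p = faces // 2
--     res = [0] * faces
--     for i in range(p):
--         res[i] = seq[i]
--         res[p + (-i) % p] = seq[p + i]
--     return res
-- ===== Notes on version B (the rewrite author's own statement) =====
-- stated objective: alternative
-- what changed: Replaces the top-down recursion with an explicit bottom-up loop over the halving chain of orders, builds each level by list comprehensions instead of indexed writes into a preallocated zero array, and inlines the whole pipeline into one function; the final bipyramidal scatter stays an indexed loop.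
import Mathlib
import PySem

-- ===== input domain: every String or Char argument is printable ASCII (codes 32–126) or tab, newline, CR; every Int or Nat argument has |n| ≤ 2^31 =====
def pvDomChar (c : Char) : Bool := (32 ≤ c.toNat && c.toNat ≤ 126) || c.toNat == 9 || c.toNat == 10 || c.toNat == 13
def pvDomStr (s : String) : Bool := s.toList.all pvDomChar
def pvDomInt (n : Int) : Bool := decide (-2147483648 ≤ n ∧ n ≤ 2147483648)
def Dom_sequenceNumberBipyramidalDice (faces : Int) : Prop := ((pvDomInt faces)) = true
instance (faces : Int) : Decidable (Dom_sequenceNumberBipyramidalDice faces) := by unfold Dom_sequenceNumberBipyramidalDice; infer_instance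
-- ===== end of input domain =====

-- B replaces A's top-down recursion by an explicit bottom-up loop over the halving chain of
-- orders and builds each level by comprehensions instead of indexed writes, with the whole
-- pipeline inlined into one function; the final bipyramidal scatter stays an indexed loop.

-- ===== PORT A =====
def pyIsEven (n : Int) : Bool := PySem.Int.mod n 2 == 0

-- recursiveDiceNumberSequence; fuel only bounds the halving recursion (Python recurses on
-- math.trunc(order/2) = Int.tdiv order 2; exact here since |order| < 2^52).  List indexing is
-- written with getD: every index the Python executes is in range, so this is exact there.
def recursiveDiceNumberSequence : Nat → Int → List Int
  | 0, _ => []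
  | fuel + 1, order =>
    if order == 3 then [3, 1, 2]
    else if order == 4 then [4, 1, 3, 2]
    else if order == 5 then [5, 1, 4, 2, 3]
    else
      let newOrder : Int := order.tdiv 2
      let recursiveSequence := recursiveDiceNumberSequence fuel newOrder
      let numberSequence : List Int := List.replicate order.toNat 0
      if pyIsEven order then
        (List.range newOrder.toNat).foldl (fun ns i =>
          let ns := ns.set i (recursiveSequence.getD i 0 * 2)
          if pyIsEven newOrder then
            ns.set (newOrder.toNat + i) (ns.getD i 0 - 1)
          else
            ns.set (newOrder.toNat + i) ((newOrder - recursiveSequence.getD i 0 + 1) * 2 - 1)) numberSequence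
      else
        let numberSequence := numberSequence.set 0 order
        (List.range newOrder.toNat).foldl (fun ns i =>
          let ns := ns.set (i + 1) (recursiveSequence.getD (newOrder.toNat - i - 1) 0 * 2)
          ns.set (order.toNat - (i + 1)) (order - ns.getD (i + 1) 0)) numberSequence

def diceNumberAlgorithmSequence (faces : Int) : List Int :=
  if faces < 3 then (List.range faces.toNat).map (fun i : Nat => (i : Int) + 1)
  else if faces == 4 then [4, 2, 1, 3]
  else if pyIsEven faces then
    let evenFaces : Int := faces.tdiv 2
    let numberSequenceOrder := recursiveDiceNumberSequence faces.toNat evenFaces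
    (List.range evenFaces.toNat).foldl (fun ns i =>
      let ns := ns.set i (ns.getD i 0 * 2)
      ns ++ [faces - ns.getD i 0 + 1]) numberSequenceOrder
  else recursiveDiceNumberSequence faces.toNat faces

def sequenceNumberBipyramidalDice (faces : Int) : List Int :=
  let sequenceOrder := diceNumberAlgorithmSequence faces
  let sequenceOrder :=
    if faces == 10 then
      match PySem.List.index? sequenceOrder 10 with
      | some tenPosition => sequenceOrder.set tenPosition 0
      | none => sequenceOrder   -- Python would raise ValueError; unreachable (the faces=10 sequence contains 10)
    else sequenceOrder
  let bipyramidalSequence : List Int := List.replicate faces.toNat 0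
  let polygonSides : Int := faces.tdiv 2
  (List.range polygonSides.toNat).foldl (fun b i =>
    let b := b.set i (sequenceOrder.getD i 0)
    let position : Int := PySem.Int.mod ((i : Int) * (-1)) polygonSides + polygonSides
    b.set position.toNat (sequenceOrder.getD (i + polygonSides.toNat) 0)) bipyramidalSequence

-- ===== PORT B =====
-- chain of orders halved down to a base case (Source B's while loop; fuel bounds the halving)
def buildChain : Nat → Int → List Int × Int
  | 0, order => ([], order)
  | fuel + 1, order =>
    if order == 3 || order == 4 || order == 5 then ([], order)
    else
      let next := PySem.Int.floordiv order 2
      let cb := buildChain fuel next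
      (order :: cb.1, cb.2)

-- one upward rebuilding step (the body of Source B's 'for n in reversed(chain)')
def stepUp (seq : List Int) (n : Int) : List Int :=
  let h : Int := PySem.Int.floordiv n 2
  if PySem.Int.mod n 2 == 0 then
    if PySem.Int.mod h 2 == 0 then
      seq.map (fun x => x * 2) ++ seq.map (fun x => x * 2 - 1)
    else
      seq.map (fun x => x * 2) ++ seq.map (fun x => (h - x + 1) * 2 - 1)
  else
    let evens := (List.range h.toNat).map (fun i => seq.getD (h.toNat - 1 - i) 0 * 2)
    n :: (evens ++ evens.reverse.map (fun e => n - e))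

def sequenceNumberBipyramidalDice_alt (faces : Int) : List Int :=
  let seq :=
    if faces < 3 then PySem.List.pyRange 1 (faces + 1) 1
    else if faces == 4 then [4, 2, 1, 3]
    else
      let order : Int := if PySem.Int.mod faces 2 == 0 then PySem.Int.floordiv faces 2 else faces
      let cb := buildChain faces.toNat order
      let base : List Int :=
        if cb.2 == 3 then [3, 1, 2]
        else if cb.2 == 4 then [4, 1, 3, 2]
        else [5, 1, 4, 2, 3]
      let s := cb.1.reverse.foldl stepUp base
      if PySem.Int.mod faces 2 == 0 then
        let doubled := s.map (fun x => x * 2)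
        doubled ++ doubled.map (fun x => faces - x + 1)
      else s
  let seq :=
    if faces == 10 then
      match PySem.List.index? seq 10 with
      | some i => seq.set i 0
      | none => seq   -- Python would raise ValueError; unreachable
    else seq
  let p : Int := PySem.Int.floordiv faces 2
  (List.range p.toNat).foldl (fun res i =>
    let res := res.set i (seq.getD i 0)
    res.set (p + PySem.Int.mod (-(i : Int)) p).toNat (seq.getD (p.toNat + i) 0))
    (List.replicate faces.toNat 0)

-- ===== PRECONDITION & SPEC =====
def Spec_sequenceNumberBipyramidalDice (faces : Int) (out : List Int) : Prop := out = sequenceNumberBipyramidalDice_alt faces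
instance (faces : Int) (out : List Int) : Decidable (Spec_sequenceNumberBipyramidalDice faces out) := by unfold Spec_sequenceNumberBipyramidalDice; infer_instance

-- ===== CLAIM (what is proved, stated in full; the proofs are below) =====
def Claim_equal_sequenceNumberBipyramidalDice : Prop := ∀ (faces : Int), Dom_sequenceNumberBipyramidalDice faces → Spec_sequenceNumberBipyramidalDice faces (sequenceNumberBipyramidalDice faces)

-- ===== LEMMAS AND PROOFS =====

-- small list/arith helpers
theorem getD_set_self (l : List Int) (n : Nat) (a d : Int) (h : n < l.length) :
    (l.set n a).getD n d = a := by
  simp [List.getD, h]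

theorem set_take_succ (l : List Int) (n : Nat) (a : Int) (h : n < l.length) :
    (l.set n a).take (n+1) = l.take n ++ [a] := by
  rw [List.take_set, List.take_succ_eq_append_getElem (by simpa using h)]
  rw [List.set_append]
  simp [Nat.min_eq_left h.le]

theorem mod_two_eq' (n : Int) : PySem.Int.mod n 2 = n % 2 :=
  PySem.Int.mod_eq_emod_of_pos (by norm_num)

theorem floordiv_two_eq (n : Int) : PySem.Int.floordiv n 2 = n / 2 :=
  PySem.Int.floordiv_eq_ediv_of_pos (by norm_num)

theorem pyIsEven_iff (n : Int) : pyIsEven n = true ↔ n % 2 = 0 := by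
  simp [pyIsEven, mod_two_eq']

theorem range_map_getD (S : List Int) (F : Int → Int) :
    (List.range S.length).map (fun i => F (S.getD i 0)) = S.map F := by
  apply List.ext_getElem
  · simp
  · intro i h1 h2
    have h1' : i < S.length := by simpa using h1
    simp [List.getElem?_eq_getElem h1']

-- the even-order write loop of A fills positions [k,h) and [h+k,2h)
theorem loopE (h : Nat) (f g : Nat → Int) (st : List Int → Nat → List Int)
    (hst : ∀ ns i, ns.length = 2*h → i < h → st ns i = (ns.set i (f i)).set (h + i) (g i)) :
    ∀ (m k : Nat) (L : List Int), k + m = h → L.length = 2*h →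
    (List.range' k m).foldl st L
      = L.take k ++ (List.range' k m).map f ++ (L.drop h).take k ++ (List.range' k m).map g := by
  intro m
  induction m with
  | zero =>
    intro k L hk hL
    have hk' : k = h := by omega
    rw [hk']
    simp only [List.range'_zero, List.foldl_nil, List.map_nil, List.append_nil]
    rw [List.take_of_length_le (l := L.drop h) (by simp [hL]; omega)]
    exact (List.take_append_drop h L).symm
  | succ m ih =>
    intro k L hk hL
    have hkh : k < h := by omega
    rw [List.range'_succ]
    simp only [List.foldl_cons]
    rw [hst L k hL hkh]
    set L' := (L.set k (f k)).set (h+k) (g k) with hL'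
    have hlen : L'.length = 2*h := by simp [hL', hL]
    rw [ih (k+1) L' (by omega) hlen]
    have h1 : L'.take (k+1) = L.take k ++ [f k] := by
      rw [hL', List.take_set_of_le (by omega)]
      exact set_take_succ L k (f k) (by omega)
    have h2 : (L'.drop h).take (k+1) = (L.drop h).take k ++ [g k] := by
      rw [hL', List.drop_set, if_neg (by omega)]
      rw [show h + k - h = k by omega]
      rw [set_take_succ _ k (g k) (by simp [hL]; omega)]
      congr 2
      rw [List.drop_set, if_pos (by omega)]
    rw [h1, h2]
    simp [List.range'_succ, List.append_assoc]

-- the odd-order write loop of A fills positions [k+1,h] and (h,2h-k]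
theorem loopO (h : Nat) (f g : Nat → Int) (st : List Int → Nat → List Int)
    (hst : ∀ ns i, ns.length = 2*h+1 → i < h → st ns i = (ns.set (i+1) (f i)).set (2*h - i) (g i)) :
    ∀ (m k : Nat) (L : List Int), k + m = h → L.length = 2*h+1 →
    (List.range' k m).foldl st L
      = L.take (k+1) ++ (List.range' k m).map f ++ ((List.range' k m).map g).reverse ++ L.drop (2*h+1-k) := by
  intro m
  induction m with
  | zero =>
    intro k L hk hL
    have hk' : k = h := by omega
    rw [hk']
    simp only [List.range'_zero, List.foldl_nil, List.map_nil, List.reverse_nil, List.append_nil]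
    rw [show 2*h+1-h = h+1 by omega]
    exact (List.take_append_drop (h+1) L).symm
  | succ m ih =>
    intro k L hk hL
    have hkh : k < h := by omega
    rw [List.range'_succ]
    simp only [List.foldl_cons]
    rw [hst L k hL hkh]
    set L' := (L.set (k+1) (f k)).set (2*h-k) (g k) with hL'
    have hlen : L'.length = 2*h+1 := by simp [hL', hL]
    rw [ih (k+1) L' (by omega) hlen]
    have h1 : L'.take (k+2) = L.take (k+1) ++ [f k] := by
      rw [hL', List.take_set_of_le (by omega)]
      exact set_take_succ L (k+1) (f k) (by omega)
    have h2 : L'.drop (2*h-k) = g k :: L.drop (2*h-k+1) := by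
      rw [hL', List.drop_set, if_neg (by omega), show 2*h-k-(2*h-k) = 0 by omega]
      rw [List.drop_set, if_pos (by omega)]
      rw [List.drop_eq_getElem_cons (show 2*h-k < L.length by omega)]
      rfl
    rw [show k+1+1 = k+2 by omega, h1, show 2*h+1-(k+1) = 2*h-k by omega, h2,
        show 2*h+1-k = 2*h-k+1 by omega]
    simp [List.append_assoc]

-- ===== proof-side mirrors of B's bottom-up build =====
def chainBase (b : Int) : List Int :=
  if b == 3 then [3, 1, 2] else if b == 4 then [4, 1, 3, 2] else [5, 1, 4, 2, 3]

def chainEval (fuel : Nat) (order : Int) : List Int :=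
  (buildChain fuel order).1.reverse.foldl stepUp (chainBase (buildChain fuel order).2)

-- branch equations for stepUp
theorem stepUp_ee (seq : List Int) (n : Int) (h1 : n % 2 = 0) (h2 : (n/2) % 2 = 0) :
    stepUp seq n = seq.map (fun x => x * 2) ++ seq.map (fun x => x * 2 - 1) := by
  unfold stepUp
  simp [floordiv_two_eq, mod_two_eq', h1, h2]

theorem stepUp_eo (seq : List Int) (n : Int) (h1 : n % 2 = 0) (h2 : ¬ (n/2) % 2 = 0) :
    stepUp seq n = seq.map (fun x => x * 2) ++ seq.map (fun x => (n/2 - x + 1) * 2 - 1) := by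
  unfold stepUp
  simp [floordiv_two_eq, mod_two_eq', h1, h2]

theorem stepUp_odd (seq : List Int) (n : Int) (h1 : ¬ n % 2 = 0) :
    stepUp seq n =
      n :: ((List.range (n/2).toNat).map (fun i => seq.getD ((n/2).toNat - 1 - i) 0 * 2)
        ++ ((List.range (n/2).toNat).map (fun i => seq.getD ((n/2).toNat - 1 - i) 0 * 2)).reverse.map (fun e => n - e)) := by
  unfold stepUp
  simp [floordiv_two_eq, mod_two_eq', h1]

-- A's recursion computes exactly B's bottom-up chain rebuild, with the expected length
theorem main_rec : ∀ (fuel : Nat) (order : Int), 3 ≤ order → order.toNat < 2^fuel →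
    recursiveDiceNumberSequence fuel order = chainEval fuel order ∧
    (recursiveDiceNumberSequence fuel order).length = order.toNat := by
  intro fuel
  induction fuel with
  | zero => intro order h3 hf; exfalso; simp at hf; omega
  | succ fuel ih =>
    intro order h3 hf
    by_cases e3 : order = 3
    · subst e3
      refine ⟨?_, by simp [recursiveDiceNumberSequence]⟩
      simp [recursiveDiceNumberSequence, chainEval, buildChain, chainBase]
    by_cases e4 : order = 4
    · subst e4
      refine ⟨?_, by simp [recursiveDiceNumberSequence]⟩
      simp [recursiveDiceNumberSequence, chainEval, buildChain, chainBase]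
    by_cases e5 : order = 5
    · subst e5
      refine ⟨?_, by simp [recursiveDiceNumberSequence]⟩
      simp [recursiveDiceNumberSequence, chainEval, buildChain, chainBase]
    have h6 : 6 ≤ order := by omega
    have b3 : (order == 3) = false := by simp [e3]
    have b4 : (order == 4) = false := by simp [e4]
    have b5 : (order == 5) = false := by simp [e5]
    set nO : Int := order.tdiv 2 with hnO
    have hnOe : nO = order / 2 := Int.tdiv_eq_ediv_of_nonneg (by omega)
    have hnO3 : 3 ≤ nO := by rw [hnOe]; omega
    have hnOn : 0 ≤ nO := by omega
    have hnOlt : nO.toNat < 2^fuel := by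
      have h1 : nO.toNat ≤ order.toNat / 2 := by rw [hnOe]; omega
      have := hf
      simp [pow_succ] at this ⊢
      omega
    obtain ⟨ihEq, ihLen⟩ := ih nO hnO3 hnOlt
    set rec' : List Int := recursiveDiceNumberSequence fuel nO with hrec'
    have hfd : PySem.Int.floordiv order 2 = nO := by rw [floordiv_two_eq, hnOe]
    have hchain : buildChain (fuel+1) order = (order :: (buildChain fuel nO).1, (buildChain fuel nO).2) := by
      simp [buildChain, b3, b4, b5, hfd]
      exact ⟨by rw [hnOe], by rw [hnOe]⟩
    have hce : chainEval (fuel+1) order = stepUp (chainEval fuel nO) order := by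
      unfold chainEval
      rw [hchain]
      simp [List.foldl_append]
    have hAbody : recursiveDiceNumberSequence (fuel+1) order =
        (if pyIsEven order then
          (List.range nO.toNat).foldl (fun ns i =>
            let ns2 := ns.set i (rec'.getD i 0 * 2)
            if pyIsEven nO then
              ns2.set (nO.toNat + i) (ns2.getD i 0 - 1)
            else
              ns2.set (nO.toNat + i) ((nO - rec'.getD i 0 + 1) * 2 - 1)) (List.replicate order.toNat 0)
        else
          (List.range nO.toNat).foldl (fun ns i =>
            let ns2 := ns.set (i + 1) (rec'.getD (nO.toNat - i - 1) 0 * 2)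
            ns2.set (order.toNat - (i + 1)) (order - ns2.getD (i + 1) 0))
            ((List.replicate order.toNat 0).set 0 order)) := by
      conv_lhs => rw [recursiveDiceNumberSequence]
      rw [if_neg (by simp [b3]), if_neg (by simp [b4]), if_neg (by simp [b5])]
    have hA : recursiveDiceNumberSequence (fuel+1) order = stepUp rec' order ∧
        (stepUp rec' order).length = order.toNat := by
      rw [hAbody]
      by_cases heven : pyIsEven order = true
      · -- even order: order.toNat = 2 * nO.toNat
        have hor2 : order = 2 * nO := by
          rw [hnOe]
          have := (pyIsEven_iff order).mp heven
          omega
        have htn : order.toNat = 2 * nO.toNat := by omega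
        rw [if_pos heven]
        by_cases hev2 : pyIsEven nO = true
        · rw [stepUp_ee rec' order ((pyIsEven_iff order).mp heven)
              (by rw [← hnOe]; exact (pyIsEven_iff nO).mp hev2)]
          have hloop := loopE nO.toNat (fun i => rec'.getD i 0 * 2) (fun i => rec'.getD i 0 * 2 - 1)
            (fun ns i =>
              let ns2 := ns.set i (rec'.getD i 0 * 2)
              if pyIsEven nO then
                ns2.set (nO.toNat + i) (ns2.getD i 0 - 1)
              else
                ns2.set (nO.toNat + i) ((nO - rec'.getD i 0 + 1) * 2 - 1))
            (by
              intro ns i hlen hi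
              dsimp only
              rw [if_pos hev2, getD_set_self ns i _ 0 (by omega)])
            nO.toNat 0 (List.replicate order.toNat 0) (by omega) (by simp [htn])
          rw [List.range_eq_range', hloop]
          simp only [List.take_zero, List.nil_append, List.append_nil]
          rw [← List.range_eq_range']
          have hr1 := range_map_getD rec' (fun x => x * 2)
          have hr2 := range_map_getD rec' (fun x => x * 2 - 1)
          rw [ihLen] at hr1 hr2
          rw [hr1, hr2]
          refine ⟨rfl, by simp [ihLen]; omega⟩
        · rw [stepUp_eo rec' order ((pyIsEven_iff order).mp heven)
              (by rw [← hnOe]; intro hc; exact hev2 ((pyIsEven_iff nO).mpr hc)), ← hnOe]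
          have hloop := loopE nO.toNat (fun i => rec'.getD i 0 * 2)
            (fun i => (nO - rec'.getD i 0 + 1) * 2 - 1)
            (fun ns i =>
              let ns2 := ns.set i (rec'.getD i 0 * 2)
              if pyIsEven nO then
                ns2.set (nO.toNat + i) (ns2.getD i 0 - 1)
              else
                ns2.set (nO.toNat + i) ((nO - rec'.getD i 0 + 1) * 2 - 1))
            (by
              intro ns i hlen hi
              dsimp only
              rw [if_neg hev2])
            nO.toNat 0 (List.replicate order.toNat 0) (by omega) (by simp [htn])
          rw [List.range_eq_range', hloop]
          simp only [List.take_zero, List.nil_append, List.append_nil]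
          rw [← List.range_eq_range']
          have hr1 := range_map_getD rec' (fun x => x * 2)
          have hr2 := range_map_getD rec' (fun x => (nO - x + 1) * 2 - 1)
          rw [ihLen] at hr1 hr2
          rw [hr1, hr2]
          refine ⟨rfl, by simp [ihLen]; omega⟩
      · -- odd order: order.toNat = 2 * nO.toNat + 1
        have hor2 : order = 2 * nO + 1 := by
          rw [hnOe]
          have : ¬ order % 2 = 0 := fun hc => heven ((pyIsEven_iff order).mpr hc)
          omega
        have htn : order.toNat = 2 * nO.toNat + 1 := by omega
        rw [if_neg heven]
        rw [stepUp_odd rec' order (fun hc => heven ((pyIsEven_iff order).mpr hc)), ← hnOe]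
        have hloop := loopO nO.toNat (fun i => rec'.getD (nO.toNat - i - 1) 0 * 2)
          (fun i => order - rec'.getD (nO.toNat - i - 1) 0 * 2)
          (fun ns i =>
            let ns2 := ns.set (i + 1) (rec'.getD (nO.toNat - i - 1) 0 * 2)
            ns2.set (order.toNat - (i + 1)) (order - ns2.getD (i + 1) 0))
          (by
            intro ns i hlen hi
            dsimp only
            rw [getD_set_self ns (i+1) _ 0 (by omega),
               show order.toNat - (i+1) = 2*nO.toNat - i by omega])
          nO.toNat 0 ((List.replicate order.toNat 0).set 0 order) (by omega) (by simp [htn])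
        rw [List.range_eq_range', hloop]
        have htake : ((List.replicate order.toNat 0).set 0 (order : Int)).take (0+1) = [order] := by
          rw [set_take_succ _ 0 _ (by simp; omega)]
          simp
        have hdrop : ((List.replicate order.toNat 0).set 0 (order : Int)).drop (2*nO.toNat+1-0) = [] := by
          apply List.drop_eq_nil_of_le
          simp [htn]
        rw [htake, hdrop]
        rw [← List.range_eq_range']
        have hmapg : (List.range nO.toNat).map (fun i => order - rec'.getD (nO.toNat - i - 1) 0 * 2)
            = ((List.range nO.toNat).map (fun i => rec'.getD (nO.toNat - i - 1) 0 * 2)).map (fun e => order - e) := by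
          rw [List.map_map]
          rfl
        have hidx : (List.range nO.toNat).map (fun i => rec'.getD (nO.toNat - i - 1) 0 * 2)
            = (List.range nO.toNat).map (fun i => rec'.getD (nO.toNat - 1 - i) 0 * 2) := by
          apply List.map_congr_left
          intro i _
          congr 2
          omega
        refine ⟨?_, ?_⟩
        · rw [hmapg, hidx, List.map_reverse]
          simp [List.append_assoc]
        · simp [htn]
          omega
    exact ⟨by rw [hA.1, hce, ihEq], by rw [hA.1]; exact hA.2⟩

-- A's doubling/appending loop in diceNumberAlgorithmSequence
theorem loopD (faces : Int) (rec : List Int) :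
    ∀ (m k : Nat), k + m = rec.length →
    (List.range' k m).foldl
      (fun ns i => (ns.set i (ns.getD i 0 * 2)) ++ [faces - (ns.set i (ns.getD i 0 * 2)).getD i 0 + 1])
      ((rec.take k).map (fun x => x * 2) ++ rec.drop k ++ (List.range k).map (fun i => faces - rec.getD i 0 * 2 + 1))
      = rec.map (fun x => x * 2) ++ (List.range rec.length).map (fun i => faces - rec.getD i 0 * 2 + 1) := by
  intro m
  induction m with
  | zero =>
    intro k hk
    have hk' : k = rec.length := by omega
    rw [hk']
    simp
  | succ m ih =>
    intro k hk
    have hkl : k < rec.length := by omega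
    rw [List.range'_succ]
    simp only [List.foldl_cons]
    have hlenA : ((rec.take k).map (fun x : Int => x * 2)).length = k := by
      simp; omega
    have hdropc : rec.drop k = rec[k] :: rec.drop (k+1) := List.drop_eq_getElem_cons hkl
    have hgd : ((rec.take k).map (fun x : Int => x * 2) ++ rec.drop k ++
        (List.range k).map (fun i => faces - rec.getD i 0 * 2 + 1)).getD k 0 = rec.getD k 0 := by
      rw [List.append_assoc]
      rw [List.getD_append_right _ _ 0 k hlenA.le, hlenA, Nat.sub_self]
      rw [List.getD_append _ _ 0 0 (by simp; omega)]
      rw [hdropc, List.getD_cons_zero]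
      simp [List.getD, List.getElem?_eq_getElem hkl]
    have hset : (((rec.take k).map (fun x : Int => x * 2) ++ rec.drop k ++
        (List.range k).map (fun i => faces - rec.getD i 0 * 2 + 1)).set k (rec.getD k 0 * 2))
        = (rec.take (k+1)).map (fun x : Int => x * 2) ++ rec.drop (k+1)
          ++ (List.range k).map (fun i => faces - rec.getD i 0 * 2 + 1) := by
      rw [List.append_assoc, List.set_append, if_neg (by rw [hlenA]; omega)]
      rw [hlenA, Nat.sub_self]
      rw [List.set_append, if_pos (by simp; omega)]
      rw [hdropc, List.set_cons_zero]
      rw [List.take_succ_eq_append_getElem hkl, List.map_append]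
      simp [List.getD, List.getElem?_eq_getElem hkl, List.append_assoc]
    rw [hgd, hset]
    have hgd2 : ((rec.take (k+1)).map (fun x : Int => x * 2) ++ rec.drop (k+1)
          ++ (List.range k).map (fun i => faces - rec.getD i 0 * 2 + 1)).getD k 0
        = rec.getD k 0 * 2 := by
      rw [List.append_assoc]
      rw [List.getD_append _ _ 0 k (by simp; omega)]
      rw [List.getD_eq_getElem _ 0 (by simp; omega)]
      simp only [List.getElem_map, List.getElem_take]
      rw [List.getD_eq_getElem rec 0 hkl]
    rw [hgd2]
    have hassoc : (rec.take (k+1)).map (fun x : Int => x * 2) ++ rec.drop (k+1)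
          ++ (List.range k).map (fun i => faces - rec.getD i 0 * 2 + 1)
          ++ [faces - rec.getD k 0 * 2 + 1]
        = (rec.take (k+1)).map (fun x : Int => x * 2) ++ rec.drop (k+1)
          ++ (List.range (k+1)).map (fun i => faces - rec.getD i 0 * 2 + 1) := by
      rw [List.range_succ]
      simp [List.append_assoc]
    rw [hassoc]
    exact ih (k+1) (by omega)

-- proof-side views of the two programs: the pre-remap sequence (incl. the faces == 10 fix-up)
def tenFix (faces : Int) (s : List Int) : List Int :=
  if faces == 10 then
    match PySem.List.index? s 10 with
    | some i => s.set i 0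
    | none => s
  else s

def aSeq (faces : Int) : List Int := tenFix faces (diceNumberAlgorithmSequence faces)

def bCore (faces : Int) : List Int :=
  let order : Int := if PySem.Int.mod faces 2 == 0 then PySem.Int.floordiv faces 2 else faces
  let seq := chainEval faces.toNat order
  if PySem.Int.mod faces 2 == 0 then
    let doubled := seq.map (fun x => x * 2)
    doubled ++ doubled.map (fun x => faces - x + 1)
  else seq

def bPreSeq (faces : Int) : List Int :=
  if faces == 4 then [4, 2, 1, 3] else bCore faces

def bSeq (faces : Int) : List Int :=
  tenFix faces
    (if faces < 3 then PySem.List.pyRange 1 (faces + 1) 1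
     else if faces == 4 then [4, 2, 1, 3]
     else bCore faces)

-- the two remap loops, as (faces, sequence) functions
def remapA (faces : Int) (S : List Int) : List Int :=
  (List.range (faces.tdiv 2).toNat).foldl (fun b i =>
    (b.set i (S.getD i 0)).set
      (PySem.Int.mod ((i : Int) * (-1)) (faces.tdiv 2) + faces.tdiv 2).toNat
      (S.getD (i + (faces.tdiv 2).toNat) 0)) (List.replicate faces.toNat 0)

def remapB (faces : Int) (S : List Int) : List Int :=
  (List.range (PySem.Int.floordiv faces 2).toNat).foldl (fun res i =>
    (res.set i (S.getD i 0)).set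
      (PySem.Int.floordiv faces 2 + PySem.Int.mod (-(i : Int)) (PySem.Int.floordiv faces 2)).toNat
      (S.getD ((PySem.Int.floordiv faces 2).toNat + i) 0)) (List.replicate faces.toNat 0)

theorem a_split (faces : Int) : sequenceNumberBipyramidalDice faces = remapA faces (aSeq faces) := rfl

theorem b_split (faces : Int) : sequenceNumberBipyramidalDice_alt faces = remapB faces (bSeq faces) := rfl

-- the pre-fix-up sequences agree, with length faces (faces ≥ 3)
theorem seq_eq (faces : Int) (h3 : 3 ≤ faces) :
    diceNumberAlgorithmSequence faces = bPreSeq faces ∧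
    (diceNumberAlgorithmSequence faces).length = faces.toNat := by
  by_cases e4 : faces = 4
  · subst e4
    exact ⟨by decide, by decide⟩
  have b4 : (faces == 4) = false := by simp [e4]
  by_cases heven : faces % 2 = 0
  · have h6 : 6 ≤ faces := by omega
    have hbe : pyIsEven faces = true := (pyIsEven_iff faces).mpr heven
    have hbe' : (PySem.Int.mod faces 2 == 0) = true := hbe
    set eF : Int := faces.tdiv 2 with heF
    have heFe : eF = faces / 2 := Int.tdiv_eq_ediv_of_nonneg (by omega)
    have h3' : 3 ≤ eF := by rw [heFe]; omega
    have hlt : eF.toNat < 2^(faces.toNat) :=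
      lt_of_le_of_lt (by omega) (Nat.lt_two_pow_self (n := faces.toNat))
    obtain ⟨hEq, hLen⟩ := main_rec faces.toNat eF h3' hlt
    set rec' : List Int := recursiveDiceNumberSequence faces.toNat eF with hrec'
    have hAside : diceNumberAlgorithmSequence faces
        = rec'.map (fun x => x * 2)
          ++ (List.range rec'.length).map (fun i => faces - rec'.getD i 0 * 2 + 1) := by
      unfold diceNumberAlgorithmSequence
      rw [if_neg (by omega : ¬ faces < 3), if_neg (by simp [b4]), if_pos hbe]
      dsimp only
      have hD := loopD faces rec' rec'.length 0 (by omega)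
      simp only [List.take_zero, List.map_nil, List.nil_append, List.drop_zero,
        List.range_zero, List.append_nil] at hD
      rw [show List.range eF.toNat = List.range' 0 rec'.length by rw [hLen, List.range_eq_range']]
      exact hD
    have hBside : bPreSeq faces
        = rec'.map (fun x => x * 2)
          ++ (List.range rec'.length).map (fun i => faces - rec'.getD i 0 * 2 + 1) := by
      unfold bPreSeq bCore
      rw [if_neg (by simp [b4])]
      dsimp only
      simp only [hbe', if_true]
      have hfd : PySem.Int.floordiv faces 2 = eF := by rw [floordiv_two_eq, heFe]
      rw [hfd, ← hEq]
      have hmm : (rec'.map (fun x => x * 2)).map (fun x => faces - x + 1)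
          = rec'.map (fun x => faces - x * 2 + 1) := by
        rw [List.map_map]; rfl
      have hrr := range_map_getD rec' (fun x => faces - x * 2 + 1)
      rw [hmm, ← hrr]
    refine ⟨by rw [hAside, hBside], ?_⟩
    rw [hAside]
    simp [hLen]
    omega
  · have hbo : ¬ pyIsEven faces = true := fun hc => heven ((pyIsEven_iff faces).mp hc)
    have hbo' : (PySem.Int.mod faces 2 == 0) = false := by
      simp [mod_two_eq']
      omega
    have hlt : faces.toNat < 2^(faces.toNat) := Nat.lt_two_pow_self
    obtain ⟨hEq, hLen⟩ := main_rec faces.toNat faces h3 hlt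
    have hAside : diceNumberAlgorithmSequence faces = recursiveDiceNumberSequence faces.toNat faces := by
      unfold diceNumberAlgorithmSequence
      rw [if_neg (by omega : ¬ faces < 3), if_neg (by simp [b4]), if_neg hbo]
    have hBside : bPreSeq faces = recursiveDiceNumberSequence faces.toNat faces := by
      unfold bPreSeq bCore
      rw [if_neg (by simp [b4])]
      dsimp only
      simp only [hbo', if_false]
      exact hEq.symm
    exact ⟨by rw [hAside, hBside], by rw [hAside, hLen]⟩

-- the two sequences agree for every faces
theorem seq_all (faces : Int) : aSeq faces = bSeq faces := by
  by_cases h3 : 3 ≤ faces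
  · obtain ⟨hpre, _⟩ := seq_eq faces h3
    unfold aSeq bSeq
    rw [if_neg (by omega : ¬ faces < 3), hpre]
    unfold bPreSeq
    by_cases e4 : faces = 4
    · rw [if_pos (by simp [e4])]
    · rw [if_neg (by simp [e4])]
  · -- faces < 3: A builds [1..faces] by range-map, B by pyRange; equal (both empty for faces ≤ 0)
    have h10 : (faces == 10) = false := by simp; omega
    unfold aSeq bSeq tenFix
    rw [h10]
    simp only [if_false, Bool.false_eq_true]
    rw [if_pos (by omega : faces < 3)]
    unfold diceNumberAlgorithmSequence
    rw [if_pos (by omega : faces < 3)]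
    rw [PySem.List.pyRange_one]
    rw [show faces + 1 - 1 = faces by ring]
    exact List.map_congr_left (fun i _ => by omega)

-- the two remap loops agree as functions, for every faces
theorem remap_all (faces : Int) (S : List Int) : remapA faces S = remapB faces S := by
  unfold remapA remapB
  by_cases h : 0 ≤ faces
  · have e : PySem.Int.floordiv faces 2 = faces.tdiv 2 := by
      rw [floordiv_two_eq, Int.tdiv_eq_ediv_of_nonneg h]
    rw [e]
    congr 1
    funext b i
    rw [show ((i : Int) * (-1)) = -(i : Int) by ring, Int.add_comm, Nat.add_comm]
  · have h1 : (faces.tdiv 2).toNat = 0 := by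
      have h2' : (0:Int) ≤ -faces := by omega
      have e1 : (-faces).tdiv 2 = (-faces)/2 := Int.tdiv_eq_ediv_of_nonneg h2'
      have e2 : faces.tdiv 2 = -((-faces).tdiv 2) := by rw [← Int.neg_tdiv]; simp
      have e3 : 0 ≤ (-faces)/2 := Int.ediv_nonneg h2' (by norm_num)
      omega
    have h2 : (PySem.Int.floordiv faces 2).toNat = 0 := by
      rw [floordiv_two_eq]
      have : faces / 2 ≤ 0 / 2 := Int.ediv_le_ediv (by norm_num) (by omega)
      simp at this
      omega
    rw [h1, h2]
    simp

-- ===== VERDICT (by name: the statement is the Claim_ definition above) =====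
theorem sequenceNumberBipyramidalDice_spec : Claim_equal_sequenceNumberBipyramidalDice := by
  intro faces _
  show sequenceNumberBipyramidalDice faces = sequenceNumberBipyramidalDice_alt faces
  rw [a_split, b_split, seq_all, remap_all]
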